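-- pv_equiv track=rewrite | github.com/JohnReid/RegVar | python/regvar/__init__.py | index_of_nth_base
-- ===== SOURCE A (Python) =====
-- def index_of_nth_base(gappedseq, n):
--     """Return the index of the nth non-gapped base in the sequence
--     where n=0 is the first."""
--     nongapped = 0
--     for i, b in enumerate(gappedseq):
--         if b == '-':
--             continue
--         if nongapped == n:
--             return i
--         nongapped += 1
--     raise ValueError(
--         "Could not find {0}'th non-gapped base in sequence".format(n))
-- ===== SOURCE B (Python) =====
-- def index_of_nth_base(gappedseq, n):
--     """Return the index of the nth non-gapped base in the sequence
--     where n=0 is the first."""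
--     positions = [i for i, b in enumerate(gappedseq) if b != '-']
--     if 0 <= n < len(positions):
--         return positions[n]
--     raise ValueError(
--         "Could not find {0}'th non-gapped base in sequence".format(n))
-- ===== Notes on version B (the rewrite author's own statement) =====
-- stated objective: simpler
-- what changed: Replaces the count-and-early-return loop over the sequence by building the full list of non-gap indices in one pass and returning positions[n] after a single bounds check.
import Mathlib
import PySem

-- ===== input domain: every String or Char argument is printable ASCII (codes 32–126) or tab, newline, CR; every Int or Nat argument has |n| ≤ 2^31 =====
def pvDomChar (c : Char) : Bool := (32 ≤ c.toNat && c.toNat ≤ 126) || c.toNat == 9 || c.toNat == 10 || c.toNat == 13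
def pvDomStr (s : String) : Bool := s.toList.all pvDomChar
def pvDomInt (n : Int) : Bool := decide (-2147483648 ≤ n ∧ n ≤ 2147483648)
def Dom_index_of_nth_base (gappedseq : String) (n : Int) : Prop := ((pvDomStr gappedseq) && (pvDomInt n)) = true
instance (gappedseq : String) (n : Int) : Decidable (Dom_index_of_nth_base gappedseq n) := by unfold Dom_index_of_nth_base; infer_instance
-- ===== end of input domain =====

-- B builds the list of non-gap indices in one pass and looks up positions[n] after a
-- bounds check, instead of A's count-and-early-return loop; objective: simpler.

-- ===== PORT A =====
-- A's for-loop over enumerate(gappedseq) with the running 'nongapped' counter;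
-- none = the ValueError raised when the loop falls through (excluded by Pre_).
def pvALoop (n : Int) : List (Int × Char) → Int → Option Int
  | [], _ => none
  | (i, b) :: rest, nongapped =>
    if b = '-' then pvALoop n rest nongapped
    else if nongapped = n then some i
    else pvALoop n rest (nongapped + 1)

def index_of_nth_base (gappedseq : String) (n : Int) : Int :=
  (pvALoop n (PySem.List.enumerate gappedseq.toList 0) 0).getD 0

-- ===== PORT B =====
-- positions = [i for i, b in enumerate(gappedseq) if b != '-']
def pvPositions (gappedseq : String) : List Int :=
  (PySem.List.enumerate gappedseq.toList 0).filterMap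
    (fun p => if p.2 ≠ '-' then some p.1 else none)

def index_of_nth_base_alt (gappedseq : String) (n : Int) : Int :=
  let positions := pvPositions gappedseq
  if 0 ≤ n ∧ n < (positions.length : Int) then
    (PySem.List.pyGet? positions n).getD 0
  else 0  -- raise ValueError (excluded by Pre_)

-- ===== PRECONDITION & SPEC =====
-- Pre_: exactly the inputs on which Python A returns (it raises ValueError when n is
-- negative or at least the number of non-gap characters).
def Pre_index_of_nth_base (gappedseq : String) (n : Int) : Prop :=
  0 ≤ n ∧ n < ((gappedseq.toList.filter (fun c => c ≠ '-')).length : Int)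
instance (gappedseq : String) (n : Int) : Decidable (Pre_index_of_nth_base gappedseq n) := by
  unfold Pre_index_of_nth_base; infer_instance

def pvWitness_index_of_nth_base : String × Int := ("A-CG-T", 2)

def Spec_index_of_nth_base (gappedseq : String) (n : Int) (out : Int) : Prop :=
  out = index_of_nth_base_alt gappedseq n
instance (gappedseq : String) (n : Int) (out : Int) : Decidable (Spec_index_of_nth_base gappedseq n out) := by
  unfold Spec_index_of_nth_base; infer_instance

-- ===== CLAIM (what is proved, stated in full; the proofs are below) =====
def Claim_equal_index_of_nth_base : Prop := ∀ (gappedseq : String) (n : Int), Dom_index_of_nth_base gappedseq n → Pre_index_of_nth_base gappedseq n → Spec_index_of_nth_base gappedseq n (index_of_nth_base gappedseq n)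

-- ===== LEMMAS AND PROOFS =====

-- A's loop, started with counter ng ≤ n, returns the (n-ng)'th element of the
-- filtered index list; started with ng > n it falls through.
theorem pvALoop_eq (n : Int) :
    ∀ (l : List (Int × Char)) (ng : Int),
      pvALoop n l ng =
        if ng ≤ n then
          (l.filterMap (fun p => if p.2 ≠ '-' then some p.1 else none))[(n - ng).toNat]?
        else none := by
  intro l
  induction l with
  | nil => intro ng; simp [pvALoop]
  | cons hd tl ih =>
    intro ng
    obtain ⟨i, b⟩ := hd
    by_cases hb : b = '-'
    · simp [pvALoop, hb, ih]
    · by_cases hng : ng = n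
      · subst hng
        simp [pvALoop, hb]
      · by_cases hle : ng ≤ n
        · have hlt : ng < n := lt_of_le_of_ne hle hng
          have h1 : ng + 1 ≤ n := hlt
          have h2 : (n - ng).toNat = (n - (ng + 1)).toNat + 1 := by omega
          simp [pvALoop, hb, hng, ih, hle, h1, h2]
        · have h1 : ¬ ng + 1 ≤ n := by omega
          simp [pvALoop, hb, hng, ih, hle, h1]

-- the filtered index list has one entry per non-gap character
theorem pvPositions_length :
    ∀ (xs : List Char) (s : Int),
      ((PySem.List.enumerate xs s).filterMap
          (fun p => if p.2 ≠ '-' then some p.1 else none)).length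
        = (xs.filter (fun c => c ≠ '-')).length := by
  intro xs
  induction xs with
  | nil => intro s; simp [PySem.List.enumerate_nil]
  | cons c cs ih =>
    intro s
    rw [PySem.List.enumerate_cons, List.filterMap_cons, List.filter_cons]
    by_cases hc : c = '-'
    · simpa [hc] using ih (s + 1)
    · simpa [hc] using ih (s + 1)

-- ===== VERDICT (by name: the statement is the Claim_ definition above) =====
theorem index_of_nth_base_spec : Claim_equal_index_of_nth_base := by
  intro gappedseq n _ hpre
  obtain ⟨hn0, hnlt⟩ := hpre
  unfold Spec_index_of_nth_base index_of_nth_base index_of_nth_base_alt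
  have hlen : ((pvPositions gappedseq).length : Int)
      = ((gappedseq.toList.filter (fun c => c ≠ '-')).length : Int) := by
    unfold pvPositions
    exact_mod_cast pvPositions_length gappedseq.toList 0
  have hrange : 0 ≤ n ∧ n < ((pvPositions gappedseq).length : Int) := by
    constructor
    · exact hn0
    · omega
  rw [pvALoop_eq, if_pos hn0, if_pos hrange, PySem.List.pyGet?_of_nonneg _ hn0]
  simp [pvPositions]
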